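-- pv_equiv track=rewrite | github.com/TT1nKer/AIC | src/compiler.py | _pick_recent_turns
-- ===== SOURCE A (Python) =====
-- def _pick_recent_turns(turns: list[dict], max_n: int = 6) -> list[dict]:
--     if len(turns) <= max_n:
--         return turns
--
--     kept = set()
--     # P1: last 2
--     for i in range(max(0, len(turns) - 2), len(turns)):
--         kept.add(i)
--     # P3: last user turn not in P1
--     for i in range(len(turns) - 1, -1, -1):
--         if i not in kept and turns[i].get("role") == "user":
--             kept.add(i)
--             break
--     # P5: fill remaining by recency
--     for i in range(len(turns) - 1, -1, -1):
--         if len(kept) >= max_n: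
--             break
--         kept.add(i)
--
--     return [turns[i] for i in sorted(kept)]
-- ===== SOURCE B (Python) =====
-- def _pick_recent_turns(turns: list[dict], max_n: int = 6) -> list[dict]:
--     n = len(turns)
--     if n <= max_n:
--         return turns
--     # pinned picks: the last two turns, plus the latest user turn before them
--     j = next((i for i in range(n - 3, -1, -1)
--               if turns[i].get("role") == "user"), None)
--     free = max(max_n - (2 if j is None else 3), 0)  # budget left beyond the pinned picks
--     cut = n - 2 - free                              # start of the contiguous recent block
--     if j is None:
--         return turns[cut:]
--     if j < cut:
--         return [turns[j]] + turns[cut:]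
--     return turns[cut - 1:]  # the pinned user turn is recent itself: the block absorbs its slot
-- ===== Notes on version B (the rewrite author's own statement) =====
-- stated objective: simpler
-- what changed: Replaces A's three-pass kept-index-set construction plus sort with one backward scan for the latest early user turn followed by a direct slice of the recent block computed from the remaining budget.
import Mathlib
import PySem

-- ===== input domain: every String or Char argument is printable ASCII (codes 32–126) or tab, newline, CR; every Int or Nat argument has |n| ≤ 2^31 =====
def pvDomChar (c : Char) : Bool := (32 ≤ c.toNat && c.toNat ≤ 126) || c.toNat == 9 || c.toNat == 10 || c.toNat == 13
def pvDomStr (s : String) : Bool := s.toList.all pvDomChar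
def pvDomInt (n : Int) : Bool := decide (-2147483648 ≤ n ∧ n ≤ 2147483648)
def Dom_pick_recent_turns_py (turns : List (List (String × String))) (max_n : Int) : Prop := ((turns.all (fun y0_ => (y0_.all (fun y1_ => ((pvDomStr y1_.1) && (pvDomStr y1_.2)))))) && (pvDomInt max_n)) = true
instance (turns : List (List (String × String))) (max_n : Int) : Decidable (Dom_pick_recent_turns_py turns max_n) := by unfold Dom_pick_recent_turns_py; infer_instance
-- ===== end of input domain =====

-- B replaces A's three-pass kept-index-set construction and sort by one backward scan for the
-- latest early user turn plus a direct slice of the recent block (objective: simpler).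

-- ===== PORT A =====
-- P3 loop of A: the first i (scanning the given index list) not in kept with role == "user" is added, then break.
def pickA_p3 (turns : List (List (String × String))) : List Int → PySem.Set Int → PySem.Set Int
  | [], kept => kept
  | i :: rest, kept =>
    if (!PySem.Set.contains kept i) &&
       (PySem.Dict.get? (PySem.Dict.mk (PySem.List.pyGetD turns i [])) "role" == some "user")
    then PySem.Set.add kept i
    else pickA_p3 turns rest kept

-- P5 loop of A: fill kept by recency until len(kept) >= max_n.
def pickA_p5 (max_n : Int) : List Int → PySem.Set Int → PySem.Set Int
  | [], kept => kept
  | i :: rest, kept =>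
    if max_n ≤ PySem.Set.len kept then kept
    else pickA_p5 max_n rest (PySem.Set.add kept i)

def pick_recent_turns_py (turns : List (List (String × String))) (max_n : Int) : List (List (String × String)) :=
  if PySem.List.len turns ≤ max_n then turns
  else
    (PySem.List.sorted
      (pickA_p5 max_n (PySem.List.pyRange (PySem.List.len turns - 1) (-1) (-1))
        (pickA_p3 turns (PySem.List.pyRange (PySem.List.len turns - 1) (-1) (-1))
          ((PySem.List.pyRange (max 0 (PySem.List.len turns - 2)) (PySem.List.len turns) 1).foldl
            PySem.Set.add PySem.Set.empty)))
      (fun i => i)).map (fun i => PySem.List.pyGetD turns i [])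

-- ===== PORT B =====
-- backward scan: the first i in the given (descending) index list with role == "user"
def pickB_find (turns : List (List (String × String))) : List Int → Option Int
  | [] => none
  | i :: rest =>
    if PySem.Dict.get? (PySem.Dict.mk (PySem.List.pyGetD turns i [])) "role" == some "user"
    then some i
    else pickB_find turns rest

def pick_recent_turns_py_alt (turns : List (List (String × String))) (max_n : Int) : List (List (String × String)) :=
  let n : Int := PySem.List.len turns
  if n ≤ max_n then turns
  else
    -- pinned picks: the last two turns, plus the latest user turn before them (index j)
    let j? := pickB_find turns (PySem.List.pyRange (n - 3) (-1) (-1))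
    let free := max (max_n - (match j? with | none => 2 | some _ => 3)) 0
    let cut := n - 2 - free
    match j? with
    | none => PySem.List.slice turns (some cut) none
    | some j =>
      if j < cut then PySem.List.pyGetD turns j [] :: PySem.List.slice turns (some cut) none
      else PySem.List.slice turns (some (cut - 1)) none

-- ===== PRECONDITION & SPEC =====
def Spec_pick_recent_turns_py (turns : List (List (String × String))) (max_n : Int) (out : List (List (String × String))) : Prop := out = pick_recent_turns_py_alt turns max_n
instance (turns : List (List (String × String))) (max_n : Int) (out : List (List (String × String))) : Decidable (Spec_pick_recent_turns_py turns max_n out) := by unfold Spec_pick_recent_turns_py; infer_instance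

-- ===== CLAIM (what is proved, stated in full; the proofs are below) =====
def Claim_equal_pick_recent_turns_py : Prop := ∀ (turns : List (List (String × String))) (max_n : Int), Dom_pick_recent_turns_py turns max_n → Spec_pick_recent_turns_py turns max_n (pick_recent_turns_py turns max_n)

-- ===== LEMMAS AND PROOFS =====

-- if B's scan finds j, then j is in the scanned list
theorem pickB_find_mem (turns : List (List (String × String))) (l : List Int) (j : Int)
    (h : pickB_find turns l = some j) : j ∈ l := by
  induction l with
  | nil => simp [pickB_find] at h
  | cons i rest ih =>
    simp only [pickB_find] at h
    split at h
    · simp at h; simp [h]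
    · simpa using Or.inr (ih h)

-- membership form of Set.contains on Int sets
theorem set_contains_eq (s : PySem.Set Int) (x : Int) :
    PySem.Set.contains s x = decide (x ∈ s) := by
  simp [PySem.Set.contains]

-- Set.add as an append when the element is fresh
theorem set_add_fresh (s : PySem.Set Int) (x : Int) (h : x ∉ s) :
    PySem.Set.add s x = s ++ [x] := by
  simp [PySem.Set.add, h]

theorem set_add_dup (s : PySem.Set Int) (x : Int) (h : x ∈ s) :
    PySem.Set.add s x = s := by
  simp [PySem.Set.add, h]

-- on a list of indices none of which is already kept, A's P3 loop is exactly B's scan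
theorem pickA_p3_char (turns : List (List (String × String))) (l : List Int) (kept : PySem.Set Int)
    (h : ∀ i ∈ l, PySem.Set.contains kept i = false) :
    pickA_p3 turns l kept =
      (match pickB_find turns l with
       | none => kept
       | some j => PySem.Set.add kept j) := by
  induction l with
  | nil => simp [pickA_p3, pickB_find]
  | cons i rest ih =>
    have hi : PySem.Set.contains kept i = false := h i (by simp)
    simp only [pickA_p3, pickB_find, hi]
    by_cases hr : (PySem.Dict.get? (PySem.Dict.mk (PySem.List.pyGetD turns i [])) "role" == some "user") = true
    · simp [hr]
    · simp only [Bool.not_eq_true] at hr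
      rw [hr]
      simp only [Bool.and_false, Bool.false_eq_true, if_false]
      exact ih (fun x hx => h x (by simp [hx]))

-- P5 does nothing once the size bound is reached
theorem pickA_p5_stop (m : Int) (l : List Int) (kept : PySem.Set Int)
    (h : m ≤ (kept.length : Int)) : pickA_p5 m l kept = kept := by
  cases l with
  | nil => rfl
  | cons i rest => simp [pickA_p5, PySem.Set.len, h]

-- P5 over an appended index list is sequential composition
theorem pickA_p5_append (m : Int) (l1 l2 : List Int) (kept : PySem.Set Int) :
    pickA_p5 m (l1 ++ l2) kept = pickA_p5 m l2 (pickA_p5 m l1 kept) := by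
  induction l1 generalizing kept with
  | nil => rfl
  | cons i rest ih =>
    by_cases h : m ≤ (kept.length : Int)
    · rw [pickA_p5_stop m _ kept h, pickA_p5_stop m _ kept h, pickA_p5_stop m _ kept h]
    · simp only [List.cons_append, pickA_p5, PySem.Set.len, if_neg h]
      exact ih _

theorem set_update_cons (kept : PySem.Set Int) (i : Int) (l : List Int) :
    PySem.Set.update kept (i :: l) = PySem.Set.update (PySem.Set.add kept i) l := rfl

theorem length_le_add (kept : PySem.Set Int) (i : Int) :
    kept.length ≤ (PySem.Set.add kept i).length := by
  by_cases h : i ∈ kept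
  · rw [set_add_dup kept i h]
  · rw [set_add_fresh kept i h]; simp

-- kept never shrinks under P5's adds
theorem length_le_update (kept : PySem.Set Int) (l : List Int) :
    kept.length ≤ (PySem.Set.update kept l).length := by
  induction l generalizing kept with
  | nil => exact le_refl _
  | cons i rest ih =>
    rw [set_update_cons]
    exact le_trans (length_le_add kept i) (ih _)

-- while the final size stays below the bound, P5 is a plain set-update
theorem pickA_p5_nobreak (m : Int) (l : List Int) (kept : PySem.Set Int)
    (h : ((PySem.Set.update kept l).length : Int) < m) :
    pickA_p5 m l kept = PySem.Set.update kept l := by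
  induction l generalizing kept with
  | nil => rfl
  | cons i rest ih =>
    rw [set_update_cons] at h ⊢
    have h1 : (kept.length : Int) < m := by
      have := le_trans (length_le_add kept i) (length_le_update (PySem.Set.add kept i) rest)
      omega
    simp only [pickA_p5, PySem.Set.len, if_neg (by omega : ¬ m ≤ (kept.length : Int))]
    exact ih _ h

-- a set updated with a nodup list appends exactly the fresh elements
theorem update_nodup_eq (kept : PySem.Set Int) (l : List Int) (h : l.Nodup) :
    PySem.Set.update kept l = kept ++ l.filter (fun x => !PySem.Set.contains kept x) := by
  induction l generalizing kept with
  | nil => simp [PySem.Set.update]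
  | cons i rest ih =>
    rw [set_update_cons]
    have hrest : rest.Nodup := h.of_cons
    have hir : i ∉ rest := by
      intro hx; exact (List.nodup_cons.mp h).1 hx
    by_cases hik : i ∈ kept
    · rw [set_add_dup kept i hik]
      rw [ih kept hrest]
      simp [hik]
    · rw [set_add_fresh kept i hik]
      rw [ih _ hrest]
      have hfilter : rest.filter (fun x => !PySem.Set.contains (kept ++ [i]) x)
          = rest.filter (fun x => !PySem.Set.contains kept x) := by
        apply List.filter_congr
        intro x hx
        have hxi : x ≠ i := fun he => hir (he ▸ hx)
        simp [hxi]
      rw [hfilter]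
      simp [hik]

-- main fill lemma: scanning a, a-1, …, 0 with every kept element above a or at most
-- the stopping threshold appends exactly the countdown to the threshold
theorem pickA_p5_fresh (m : Int) : ∀ (k : Nat) (a : Int) (kept : PySem.Set Int), a.toNat = k → 0 ≤ a →
    (∀ i ∈ kept, a < i ∨ i ≤ a - (m - (kept.length : Int))) →
    pickA_p5 m (PySem.List.pyRange a (-1) (-1)) kept
      = kept ++ PySem.List.pyRange a (max (a - (m - (kept.length : Int))) (-1)) (-1) := by
  intro k
  induction k with
  | zero =>
    intro a kept hk h0 hyp
    have ha : a = 0 := by omega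
    subst ha
    rw [PySem.List.pyRange_neg_one_cons (by omega)]
    by_cases hm : m ≤ (kept.length : Int)
    · rw [pickA_p5_stop m _ kept hm]
      rw [PySem.List.pyRange_neg_one_eq_nil (by omega), List.append_nil]
    · have hfresh : (0:Int) ∉ kept := by
        intro hmem
        rcases hyp 0 hmem with h | h <;> omega
      simp only [pickA_p5, PySem.Set.len, if_neg hm]
      rw [set_add_fresh kept 0 hfresh]
      rw [show (0:Int) - 1 = -1 by ring, PySem.List.pyRange_neg_one_eq_nil (le_refl _)]
      simp only [pickA_p5]
      rw [show max ((0:Int) - (m - (kept.length : Int))) (-1) = -1 by omega]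
      rw [PySem.List.pyRange_neg_one_cons (by omega), PySem.List.pyRange_neg_one_eq_nil (by omega)]
  | succ k' ih =>
    intro a kept hk h0 hyp
    have ha1 : 1 ≤ a := by omega
    rw [PySem.List.pyRange_neg_one_cons (by omega)]
    by_cases hm : m ≤ (kept.length : Int)
    · rw [pickA_p5_stop m _ kept hm]
      rw [PySem.List.pyRange_neg_one_eq_nil (by omega), List.append_nil]
    · have hfresh : a ∉ kept := by
        intro hmem
        rcases hyp a hmem with h | h <;> omega
      simp only [pickA_p5, PySem.Set.len, if_neg hm]
      rw [set_add_fresh kept a hfresh]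
      have hlen : ((kept ++ [a]).length : Int) = (kept.length : Int) + 1 := by simp
      have := ih (a - 1) (kept ++ [a]) (by omega) (by omega) ?_
      · rw [this, hlen]
        rw [show (a - 1) - (m - ((kept.length : Int) + 1)) = a - (m - (kept.length : Int)) by ring]
        rw [List.append_assoc, List.cons_append, List.nil_append]
        congr 1
        rw [← PySem.List.pyRange_neg_one_cons (by omega)]
      · intro i hi
        rcases List.mem_append.mp hi with hi | hi
        · rcases hyp i hi with h | h
          · left; omega
          · right; rw [hlen]; omega
        · left; simp at hi; omega

-- split a countdown range
theorem pyRange_neg_one_append (a c b : Int) (h1 : b ≤ c) (h2 : c ≤ a) :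
    PySem.List.pyRange a b (-1) = PySem.List.pyRange a c (-1) ++ PySem.List.pyRange c b (-1) := by
  rw [PySem.List.pyRange_neg_one_eq_reverse, PySem.List.pyRange_neg_one_eq_reverse,
      PySem.List.pyRange_neg_one_eq_reverse, ← List.reverse_append,
      ← PySem.List.pyRange_one_append (b+1) (c+1) (a+1) (by omega) (by omega)]

theorem nodup_pyRange_neg_one (a b : Int) : (PySem.List.pyRange a b (-1)).Nodup := by
  rw [PySem.List.pyRange_neg_one_eq_reverse]
  exact List.nodup_reverse.mpr (PySem.List.nodup_pyRange_one _ _)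

-- indices a, a+1, …, len-1 mapped through turns are the tail of turns
theorem map_indices (turns : List (List (String × String))) (a : Int) (h0 : 0 ≤ a) :
    (PySem.List.pyRange a ((turns.length : Int)) 1).map
      (fun i => PySem.List.pyGetD turns i ([] : List (String × String))) = turns.drop a.toNat :=
  PySem.List.map_pyGetD_pyRange' turns [] h0

-- ===== VERDICT (by name: the statement is the Claim_ definition above) =====
theorem pick_recent_turns_py_spec : Claim_equal_pick_recent_turns_py := by
  intro turns max_n _hdom
  unfold Spec_pick_recent_turns_py
  simp only [pick_recent_turns_py, pick_recent_turns_py_alt, PySem.List.len_eq]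
  by_cases h1 : (turns.length : Int) ≤ max_n
  · rw [if_pos h1, if_pos h1]
  · rw [if_neg h1, if_neg h1]
    by_cases h2 : (turns.length : Int) ≤ 2
    · -- tiny lists: A keeps every turn; B's scan finds nothing and its cut is ≤ 0
      match turns, h1, h2 with
      | [], h1, h2 =>
        have hm : max_n < 0 := by simpa using h1
        simp only [List.length_nil, Nat.cast_zero]
        rw [show (0:Int) - 3 = -3 by ring, show (0:Int) - 1 = -1 by ring,
            PySem.List.pyRange_neg_one_eq_nil (show (-1:Int) ≤ -1 by omega),
            PySem.List.pyRange_neg_one_eq_nil (show (-3:Int) ≤ -1 by omega),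
            max_eq_left (by omega : (0:Int) - 2 ≤ 0), PySem.List.pyRange_one_eq_nil (le_refl (0:Int))]
        simp only [pickA_p3, pickA_p5, pickB_find, List.foldl_nil]
        rw [max_eq_right (by omega : max_n - 2 ≤ 0)]
        rw [show (0:Int) - 2 - 0 = -(2:Int) by ring]
        rw [PySem.List.slice_from_neg_ofNat ([] : List (List (String × String))) 2 (by omega)]
        simp [PySem.List.sorted, PySem.Set.empty]
      | [a], h1, h2 =>
        have hm : max_n ≤ 0 := by simp at h1; omega
        simp only [List.length_cons, List.length_nil, Nat.reduceAdd, Nat.cast_one]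
        rw [show (1:Int) - 3 = -2 by ring,
            PySem.List.pyRange_neg_one_eq_nil (show (-2:Int) ≤ -1 by omega)]
        simp only [pickB_find]
        rw [max_eq_right (by omega : max_n - 2 ≤ 0)]
        rw [show (1:Int) - 2 - 0 = -1 by ring, PySem.List.slice_from_neg_one]
        rw [show pickA_p3 [a] (PySem.List.pyRange ((1:Int) - 1) (-1) (-1))
              ((PySem.List.pyRange (max 0 ((1:Int) - 2)) 1 1).foldl PySem.Set.add PySem.Set.empty)
            = [0] from rfl]
        rw [pickA_p5_stop _ _ _ (by norm_num; omega)]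
        rfl
      | [a, b], h1, h2 =>
        have hm : max_n ≤ 1 := by simp at h1; omega
        simp only [List.length_cons, List.length_nil, Nat.reduceAdd, Nat.cast_ofNat]
        rw [show (2:Int) - 3 = -1 by ring,
            PySem.List.pyRange_neg_one_eq_nil (show (-1:Int) ≤ -1 by omega)]
        simp only [pickB_find]
        rw [max_eq_right (by omega : max_n - 2 ≤ 0)]
        rw [show (2:Int) - 2 - 0 = 0 by ring,
            PySem.List.slice_from ([a, b]) (le_refl (0:Int))]
        rw [show pickA_p3 [a, b] (PySem.List.pyRange ((2:Int) - 1) (-1) (-1))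
              ((PySem.List.pyRange (max 0 ((2:Int) - 2)) 2 1).foldl PySem.Set.add PySem.Set.empty)
            = [0, 1] from rfl]
        rw [pickA_p5_stop _ _ _ (by norm_num; omega)]
        rfl
      | a :: b :: c :: rest, h1, h2 => simp at h2; omega
    · set n : Int := (turns.length : Int) with hn
      have hn3 : (3:Int) ≤ n := by omega
      have hmn : max_n < n := by omega
      -- P1: kept = {n-2, n-1}
      have hr2 : PySem.List.pyRange (n - 2) n 1 = [n - 2, n - 1] := by
        rw [PySem.List.pyRange_one_cons (by omega), show n - 2 + 1 = n - 1 by ring,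
            PySem.List.pyRange_one_cons (by omega), show n - 1 + 1 = n by ring,
            PySem.List.pyRange_one_eq_nil (le_refl n)]
      have hk0 : (PySem.List.pyRange (max 0 (n - 2)) n 1).foldl PySem.Set.add PySem.Set.empty
          = ([n - 2, n - 1] : PySem.Set Int) := by
        rw [max_eq_right (by omega : (0:Int) ≤ n - 2), hr2]
        simp only [List.foldl_cons, List.foldl_nil]
        rw [set_add_fresh PySem.Set.empty (n - 2) (by simp [PySem.Set.empty])]
        rw [show (PySem.Set.empty ++ [n - 2] : List Int) = [n - 2] by simp [PySem.Set.empty]]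
        rw [set_add_fresh [n - 2] (n - 1) (by simp)]
        rfl
      have hrneg : PySem.List.pyRange (n - 1) (-1) (-1)
          = (n - 1) :: (n - 2) :: PySem.List.pyRange (n - 3) (-1) (-1) := by
        rw [PySem.List.pyRange_neg_one_cons (by omega), show n - 1 - 1 = n - 2 by ring,
            PySem.List.pyRange_neg_one_cons (by omega), show n - 2 - 1 = n - 3 by ring]
      -- P3 is B's backward scan
      have hk1 : pickA_p3 turns (PySem.List.pyRange (n - 1) (-1) (-1)) ([n - 2, n - 1] : PySem.Set Int)
          = (match pickB_find turns (PySem.List.pyRange (n - 3) (-1) (-1)) with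
             | none => ([n - 2, n - 1] : PySem.Set Int)
             | some j => PySem.Set.add [n - 2, n - 1] j) := by
        have c1 : PySem.Set.contains ([n - 2, n - 1] : PySem.Set Int) (n - 1) = true := by
          rw [set_contains_eq]; simp
        have c2 : PySem.Set.contains ([n - 2, n - 1] : PySem.Set Int) (n - 2) = true := by
          rw [set_contains_eq]; simp
        rw [hrneg]
        simp only [pickA_p3, c1, c2, Bool.not_true, Bool.false_and, Bool.false_eq_true, if_false]
        refine pickA_p3_char turns _ _ ?_
        intro i hi
        rw [PySem.List.mem_pyRange_neg_one] at hi
        rw [set_contains_eq]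
        simp only [List.mem_cons, List.not_mem_nil, or_false, decide_eq_false_iff_not]
        omega
      rw [hk0, hk1]
      rcases hF : pickB_find turns (PySem.List.pyRange (n - 3) (-1) (-1)) with _ | j
      all_goals simp only []
      · -- no early user turn: both keep the recent block of max(max_n, 2) turns
        by_cases hm2e : max_n ≤ 2
        · -- A's P5 stops immediately; B has no budget beyond the pinned last two
          rw [pickA_p5_stop _ _ _ (by norm_num; omega)]
          rw [PySem.List.sorted_eq_self_of_pairwise _ _ (by simp [List.pairwise_cons]; omega)]
          rw [show ([n - 2, n - 1] : List Int) = PySem.List.pyRange (n - 2) n 1 from hr2.symm, hn]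
          rw [map_indices turns _ (by omega)]
          rw [max_eq_right (by omega : max_n - 2 ≤ 0), show n - 2 - 0 = n - 2 by ring,
              PySem.List.slice_from turns (by omega)]
        · -- fill down to n - max_n
          have hnle : ¬ max_n ≤ PySem.Set.len ([n - 2, n - 1] : PySem.Set Int) := by
            simp [PySem.Set.len]; omega
          rw [hrneg]
          simp only [pickA_p5]
          rw [if_neg hnle, set_add_dup _ _ (by simp), if_neg hnle, set_add_dup _ _ (by simp)]
          rw [pickA_p5_fresh max_n ((n - 3).toNat) (n - 3) [n - 2, n - 1] rfl (by omega)
              (by intro i hi; left; simp at hi; rcases hi with h | h <;> omega)]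
          rw [show ((([n - 2, n - 1] : List Int).length : Int)) = 2 by norm_num]
          rw [max_eq_left (by omega : (-1:Int) ≤ n - 3 - (max_n - 2)),
              show n - 3 - (max_n - 2) = n - max_n - 1 by ring]
          have hnodupL : (([n - 2, n - 1] : List Int) ++ PySem.List.pyRange (n - 3) (n - max_n - 1) (-1)).Nodup := by
            rw [List.nodup_append]
            refine ⟨by simp, nodup_pyRange_neg_one _ _, ?_⟩
            intro x hx y hy
            simp only [List.mem_cons, List.not_mem_nil, or_false] at hx
            rw [PySem.List.mem_pyRange_neg_one] at hy
            rcases hx with h | h <;> omega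
          have hperm : (PySem.List.pyRange (n - max_n) n 1).Perm
              (([n - 2, n - 1] : List Int) ++ PySem.List.pyRange (n - 3) (n - max_n - 1) (-1)) := by
            rw [List.perm_ext_iff_of_nodup (PySem.List.nodup_pyRange_one _ _) hnodupL]
            intro x
            simp only [PySem.List.mem_pyRange_one, List.mem_append, List.mem_cons,
              List.not_mem_nil, or_false, PySem.List.mem_pyRange_neg_one]
            omega
          rw [PySem.List.sorted_eq_of_perm_of_pairwise_lt _ _ _ hperm
              (PySem.List.pairwise_lt_pyRange_one _ _)]
          rw [hn, map_indices turns _ (by omega)]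
          rw [max_eq_left (by omega : (0:Int) ≤ max_n - 2),
              show n - 2 - (max_n - 2) = n - max_n by ring,
              PySem.List.slice_from turns (by omega)]
      · -- early user turn j found
        have hjmem := pickB_find_mem _ _ _ hF
        rw [PySem.List.mem_pyRange_neg_one] at hjmem
        rw [set_add_fresh _ _ (by simp; omega),
            show ([n - 2, n - 1] : PySem.Set Int) ++ [j] = [n - 2, n - 1, j] from rfl]
        by_cases hm3e : max_n ≤ 3
        · -- A's P5 stops immediately; B has no budget beyond the three pinned picks
          rw [pickA_p5_stop _ _ _ (by norm_num; omega)]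
          have hperm : ([j, n - 2, n - 1] : List Int).Perm [n - 2, n - 1, j] := by
            simpa using List.perm_append_comm (l₁ := [j]) (l₂ := [n - 2, n - 1])
          rw [PySem.List.sorted_eq_of_perm_of_pairwise_lt _ _ _ hperm
              (by simp [List.pairwise_cons]; omega)]
          rw [List.map_cons]
          rw [show ([n - 2, n - 1] : List Int) = PySem.List.pyRange (n - 2) n 1 from hr2.symm, hn]
          rw [map_indices turns _ (by omega)]
          rw [max_eq_right (by omega : max_n - 3 ≤ 0), show n - 2 - 0 = n - 2 by ring]
          rw [if_pos (by omega : j < n - 2)]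
          rw [PySem.List.slice_from turns (by omega)]
        · -- max_n ≥ 4: fill around j
          have hnle3 : ¬ max_n ≤ PySem.Set.len ([n - 2, n - 1, j] : PySem.Set Int) := by
            simp [PySem.Set.len]; omega
          rw [hrneg]
          simp only [pickA_p5]
          rw [if_neg hnle3, set_add_dup _ _ (by simp), if_neg hnle3, set_add_dup _ _ (by simp)]
          rw [max_eq_left (by omega : (0:Int) ≤ max_n - 3),
              show n - 2 - (max_n - 3) = n - max_n + 1 by ring]
          by_cases hji : j ≤ n - max_n
          · -- j lies below the recent block: it survives as an extra element
            rw [pickA_p5_fresh max_n ((n - 3).toNat) (n - 3) [n - 2, n - 1, j] rfl (by omega)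
                (by intro i hi
                    simp only [List.mem_cons, List.not_mem_nil, or_false] at hi
                    rcases hi with h | h | h
                    · left; omega
                    · left; omega
                    · right; norm_num; omega)]
            rw [show ((([n - 2, n - 1, j] : List Int).length : Int)) = 3 by norm_num]
            rw [max_eq_left (by omega : (-1:Int) ≤ n - 3 - (max_n - 3)),
                show n - 3 - (max_n - 3) = n - max_n by ring]
            have hnodupL : (([n - 2, n - 1, j] : List Int) ++ PySem.List.pyRange (n - 3) (n - max_n) (-1)).Nodup := by
              rw [List.nodup_append]
              refine ⟨by simp; omega, nodup_pyRange_neg_one _ _, ?_⟩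
              intro x hx y hy
              simp only [List.mem_cons, List.not_mem_nil, or_false] at hx
              rw [PySem.List.mem_pyRange_neg_one] at hy
              rcases hx with h | h | h <;> omega
            have hnodupR : (j :: PySem.List.pyRange (n - max_n + 1) n 1).Nodup := by
              rw [List.nodup_cons]
              refine ⟨?_, PySem.List.nodup_pyRange_one _ _⟩
              rw [PySem.List.mem_pyRange_one]
              omega
            have hperm : (j :: PySem.List.pyRange (n - max_n + 1) n 1).Perm
                (([n - 2, n - 1, j] : List Int) ++ PySem.List.pyRange (n - 3) (n - max_n) (-1)) := by
              rw [List.perm_ext_iff_of_nodup hnodupR hnodupL]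
              intro x
              simp only [List.mem_cons, PySem.List.mem_pyRange_one, List.mem_append,
                List.not_mem_nil, or_false, PySem.List.mem_pyRange_neg_one]
              omega
            have hpw : (j :: PySem.List.pyRange (n - max_n + 1) n 1).Pairwise (fun a b => a < b) := by
              rw [List.pairwise_cons]
              refine ⟨?_, PySem.List.pairwise_lt_pyRange_one _ _⟩
              intro y hy
              rw [PySem.List.mem_pyRange_one] at hy
              omega
            rw [PySem.List.sorted_eq_of_perm_of_pairwise_lt _ _ _ hperm hpw]
            rw [List.map_cons, hn, map_indices turns _ (by omega)]
            rw [if_pos (by omega : j < n - max_n + 1)]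
            rw [PySem.List.slice_from turns (by omega)]
          · -- j lies inside the recent block: the result is the plain block
            have hsplit : PySem.List.pyRange (n - 3) (-1) (-1)
                = PySem.List.pyRange (n - 3) (j - 1) (-1) ++ PySem.List.pyRange (j - 1) (-1) (-1) :=
              pyRange_neg_one_append _ _ _ (by omega) (by omega)
            rw [hsplit, pickA_p5_append]
            have hsplit2 : PySem.List.pyRange (n - 3) (j - 1) (-1)
                = PySem.List.pyRange (n - 3) j (-1) ++ [j] := by
              rw [pyRange_neg_one_append (n - 3) j (j - 1) (by omega) (by omega)]
              congr 1
              rw [PySem.List.pyRange_neg_one_cons (by omega),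
                  PySem.List.pyRange_neg_one_eq_nil (by omega)]
            have hupd : PySem.Set.update ([n - 2, n - 1, j] : PySem.Set Int)
                (PySem.List.pyRange (n - 3) (j - 1) (-1))
                = ([n - 2, n - 1, j] : List Int) ++ PySem.List.pyRange (n - 3) j (-1) := by
              rw [update_nodup_eq _ _ (nodup_pyRange_neg_one _ _), hsplit2, List.filter_append]
              have hf1 : (PySem.List.pyRange (n - 3) j (-1)).filter
                  (fun x => !PySem.Set.contains [n - 2, n - 1, j] x) = PySem.List.pyRange (n - 3) j (-1) := by
                apply List.filter_eq_self.mpr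
                intro x hx
                rw [PySem.List.mem_pyRange_neg_one] at hx
                rw [set_contains_eq]
                simp only [Bool.not_eq_true', decide_eq_false_iff_not, List.mem_cons,
                  List.not_mem_nil, or_false, not_or]
                omega
              have hf2 : ([j] : List Int).filter
                  (fun x => !PySem.Set.contains [n - 2, n - 1, j] x) = [] := by
                rw [List.filter_cons, List.filter_nil]
                rw [show PySem.Set.contains ([n - 2, n - 1, j] : PySem.Set Int) j = true by
                  rw [set_contains_eq]; simp]
                simp
              rw [hf1, hf2, List.append_nil]
            have hlen1 : ((([n - 2, n - 1, j] : List Int) ++ PySem.List.pyRange (n - 3) j (-1)).length : Int)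
                = n - j := by
              simp [PySem.List.length_pyRange_neg_one]
              omega
            rw [pickA_p5_nobreak max_n (PySem.List.pyRange (n - 3) (j - 1) (-1)) [n - 2, n - 1, j]
                (by rw [hupd, hlen1]; omega), hupd]
            rw [pickA_p5_fresh max_n ((j - 1).toNat) (j - 1) _ rfl (by omega)
                (by intro i hi
                    simp only [List.mem_append, List.mem_cons, List.not_mem_nil, or_false] at hi
                    left
                    rcases hi with (h | h | h) | h
                    · omega
                    · omega
                    · omega
                    · rw [PySem.List.mem_pyRange_neg_one] at h; omega)]
            rw [hlen1]
            rw [max_eq_left (by omega : (-1:Int) ≤ j - 1 - (max_n - (n - j))),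
                show j - 1 - (max_n - (n - j)) = n - max_n - 1 by ring]
            have hnodupL : ((([n - 2, n - 1, j] : List Int) ++ PySem.List.pyRange (n - 3) j (-1))
                ++ PySem.List.pyRange (j - 1) (n - max_n - 1) (-1)).Nodup := by
              rw [List.nodup_append, List.nodup_append]
              refine ⟨⟨by simp; omega, nodup_pyRange_neg_one _ _, ?_⟩,
                nodup_pyRange_neg_one _ _, ?_⟩
              · intro x hx y hy
                simp only [List.mem_cons, List.not_mem_nil, or_false] at hx
                rw [PySem.List.mem_pyRange_neg_one] at hy
                rcases hx with h | h | h <;> omega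
              · intro x hx y hy
                rw [PySem.List.mem_pyRange_neg_one] at hy
                simp only [List.mem_append, List.mem_cons, List.not_mem_nil, or_false] at hx
                rcases hx with (h | h | h) | h
                · omega
                · omega
                · omega
                · rw [PySem.List.mem_pyRange_neg_one] at h; omega
            have hperm : (PySem.List.pyRange (n - max_n) n 1).Perm
                ((([n - 2, n - 1, j] : List Int) ++ PySem.List.pyRange (n - 3) j (-1))
                  ++ PySem.List.pyRange (j - 1) (n - max_n - 1) (-1)) := by
              rw [List.perm_ext_iff_of_nodup (PySem.List.nodup_pyRange_one _ _) hnodupL]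
              intro x
              simp only [PySem.List.mem_pyRange_one, List.mem_append, List.mem_cons,
                List.not_mem_nil, or_false, PySem.List.mem_pyRange_neg_one]
              omega
            rw [PySem.List.sorted_eq_of_perm_of_pairwise_lt _ _ _ hperm
                (PySem.List.pairwise_lt_pyRange_one _ _)]
            rw [hn, map_indices turns _ (by omega)]
            rw [if_neg (by omega : ¬ j < n - max_n + 1),
                show n - max_n + 1 - 1 = n - max_n by ring,
                PySem.List.slice_from turns (by omega)]
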